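-- pv_equiv track=rewrite | github.com/nstavr04/MAIR-30 | TeamProject/Part1-SystemImplementation/Part1b-DialogManagement/Part1b-DialogManagement.py | keyword_matching
-- ===== SOURCE A (Python) =====
-- import string
--
-- domain_terms_dict = {
--     'pricerange': ['cheap', 'moderate', 'expensive'],
--     'area': ['north', 'south', 'east', 'west', 'centre'],
--     'food': ['african', 'asian oriental', 'australasian', 'bistro', 'british',
--              'catalan', 'chinese', 'cuban', 'european', 'french', 'fusion',
--              'gastropub', 'indian', 'international', 'italian', 'jamaican',
--              'japanese', 'korean', 'lebanese', 'mediterranean',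
--              'modern european', 'moroccan', 'north american', 'persian',
--              'polynesian', 'portuguese', 'romanian', 'seafood', 'spanish',
--              'steakhouse', 'swiss', 'thai', 'traditional', 'turkish', 'tuscan',
--              'vietnamese']
-- }
--
-- def keyword_matching(utterance):
--
--     keywords = {
--         'area': None,
--         'pricerange': None,
--         'food': None
--     }
--
--     # Remove punctuation
--     translator = str.maketrans("", "", string.punctuation)
--     tokens = utterance.translate(translator).split(' ')
--
--     for token in tokens:
--         for pref_type, pref in domain_terms_dict.items():
--             if token in pref:
--                 keywords[pref_type] = token
--
--     return keywords
-- ===== SOURCE B (Python) =====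
-- import string
--
-- domain_terms_dict = {
--     'pricerange': ['cheap', 'moderate', 'expensive'],
--     'area': ['north', 'south', 'east', 'west', 'centre'],
--     'food': ['african', 'asian oriental', 'australasian', 'bistro', 'british',
--              'catalan', 'chinese', 'cuban', 'european', 'french', 'fusion',
--              'gastropub', 'indian', 'international', 'italian', 'jamaican',
--              'japanese', 'korean', 'lebanese', 'mediterranean',
--              'modern european', 'moroccan', 'north american', 'persian',
--              'polynesian', 'portuguese', 'romanian', 'seafood', 'spanish',
--              'steakhouse', 'swiss', 'thai', 'traditional', 'turkish', 'tuscan',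
--              'vietnamese']
-- }
--
-- def keyword_matching(utterance):
--     # One tokenization pass, then, per category, scan the tokens BACKWARDS and
--     # take the first hit (= A's last-match-wins), instead of mutating a dict
--     # while looping tokens with an inner loop over all categories.
--     tokens = utterance.translate(str.maketrans("", "", string.punctuation)).split(' ')
--     rev = tokens[::-1]
--     return {cat: next((t for t in rev if t in domain_terms_dict[cat]), None)
--             for cat in ('area', 'pricerange', 'food')}
-- ===== Notes on version B (the rewrite author's own statement) =====
-- stated objective: alternative
-- what changed: B inverts the loop nesting: instead of one pass over tokens mutating a dict with an inner scan of every category, it reverses the token list once and, per category, takes the first matching token of the reversed list (first-match-on-reverse = A's last-match-wins), building the result dict directly with no mutation.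
import Mathlib
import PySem

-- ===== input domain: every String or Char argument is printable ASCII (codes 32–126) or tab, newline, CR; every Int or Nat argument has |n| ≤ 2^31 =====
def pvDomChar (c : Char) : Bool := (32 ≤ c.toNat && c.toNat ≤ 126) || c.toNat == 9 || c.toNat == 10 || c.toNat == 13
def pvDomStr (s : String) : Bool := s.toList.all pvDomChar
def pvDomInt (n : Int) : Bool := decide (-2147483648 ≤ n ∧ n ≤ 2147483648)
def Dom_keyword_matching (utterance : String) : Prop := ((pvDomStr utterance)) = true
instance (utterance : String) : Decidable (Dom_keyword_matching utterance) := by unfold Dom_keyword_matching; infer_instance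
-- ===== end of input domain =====

-- B inverts the loop nesting: it scans the reversed token list once per category and
-- takes the first hit (= A's last-match-wins), building the result without mutation.

-- string.punctuation
def pyPunctuation : List Char := "!\"#$%&'()*+,-./:;<=>?@[\\]^_`{|}~".toList

def termsP : List String := ["cheap", "moderate", "expensive"]
def termsA : List String := ["north", "south", "east", "west", "centre"]
def termsF : List String := ["african", "asian oriental", "australasian", "bistro", "british",
  "catalan", "chinese", "cuban", "european", "french", "fusion",
  "gastropub", "indian", "international", "italian", "jamaican",
  "japanese", "korean", "lebanese", "mediterranean",
  "modern european", "moroccan", "north american", "persian",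
  "polynesian", "portuguese", "romanian", "seafood", "spanish",
  "steakhouse", "swiss", "thai", "traditional", "turkish", "tuscan",
  "vietnamese"]

def domainItems : List (String × List String) :=
  [("pricerange", termsP), ("area", termsA), ("food", termsF)]

-- utterance.translate(str.maketrans("", "", string.punctuation)).split(' ')
-- (translate with a deletion-only table is an exact character filter)
def kmTokens (utterance : String) : List String :=
  (PySem.Chars.splitOn (utterance.toList.filter (fun c => !(pyPunctuation.contains c))) [' ']).map String.ofList

-- ===== PORT A =====
def kmInit : PySem.Dict String (Option String) :=
  PySem.Dict.ofList [("area", none), ("pricerange", none), ("food", none)]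

def keyword_matching (utterance : String) : List (String × Option String) :=
  ((kmTokens utterance).foldl
    (fun kw token =>
      domainItems.foldl
        (fun kw kv => if token ∈ kv.2 then kw.insert kv.1 (some token) else kw) kw)
    kmInit).items

-- ===== PORT B =====
def keyword_matching_alt (utterance : String) : List (String × Option String) :=
  let rev := (kmTokens utterance).reverse
  [("area", rev.find? (fun t => decide (t ∈ termsA))),
   ("pricerange", rev.find? (fun t => decide (t ∈ termsP))),
   ("food", rev.find? (fun t => decide (t ∈ termsF)))]

-- ===== PRECONDITION & SPEC =====
def Spec_keyword_matching (utterance : String) (out : List (String × Option String)) : Prop := out = keyword_matching_alt utterance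
instance (utterance : String) (out : List (String × Option String)) : Decidable (Spec_keyword_matching utterance out) := by unfold Spec_keyword_matching; infer_instance

-- ===== CLAIM (what is proved, stated in full; the proofs are below) =====
def Claim_equal_keyword_matching : Prop := ∀ (utterance : String), Dom_keyword_matching utterance → Spec_keyword_matching utterance (keyword_matching utterance)

-- ===== LEMMAS AND PROOFS =====
set_option maxRecDepth 100000

-- the triple-shaped dict A's loop maintains
def D3 (a p f : Option String) : PySem.Dict String (Option String) :=
  PySem.Dict.mk [("area", a), ("pricerange", p), ("food", f)]

lemma kmInit_eq : kmInit = D3 none none none := by decide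

lemma ins_area (a p f v) : (D3 a p f).insert "area" v = D3 v p f := by
  apply PySem.Dict.ext
  rw [PySem.Dict.items_insert]
  simp [D3, PySem.Dict.contains_mk]

lemma ins_price (a p f v) : (D3 a p f).insert "pricerange" v = D3 a v f := by
  apply PySem.Dict.ext
  rw [PySem.Dict.items_insert]
  simp [D3, PySem.Dict.contains_mk]

lemma ins_food (a p f v) : (D3 a p f).insert "food" v = D3 a p v := by
  apply PySem.Dict.ext
  rw [PySem.Dict.items_insert]
  simp [D3, PySem.Dict.contains_mk]

lemma step_eq (t : String) (a p f : Option String) :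
    domainItems.foldl
      (fun kw kv => if t ∈ kv.2 then kw.insert kv.1 (some t) else kw) (D3 a p f)
    = D3 (if t ∈ termsA then some t else a)
         (if t ∈ termsP then some t else p)
         (if t ∈ termsF then some t else f) := by
  simp only [domainItems, List.foldl]
  by_cases hP : t ∈ termsP <;> by_cases hA : t ∈ termsA <;> by_cases hF : t ∈ termsF <;>
    simp [hP, hA, hF, ins_area, ins_price, ins_food]

lemma or_reverse_cons (t : String) (ts : List String) (q : String → Bool) (a : Option String) :
    ((t :: ts).reverse.find? q).or a
      = (ts.reverse.find? q).or (if q t then some t else a) := by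
  rw [List.reverse_cons, List.find?_append]
  cases h : ts.reverse.find? q <;> cases hq : q t <;>
    simp [List.find?, hq, Option.or]

lemma fold_eq (ts : List String) (a p f : Option String) :
    ts.foldl
      (fun kw token =>
        domainItems.foldl
          (fun kw kv => if token ∈ kv.2 then kw.insert kv.1 (some token) else kw) kw)
      (D3 a p f)
    = D3 ((ts.reverse.find? (fun t => decide (t ∈ termsA))).or a)
         ((ts.reverse.find? (fun t => decide (t ∈ termsP))).or p)
         ((ts.reverse.find? (fun t => decide (t ∈ termsF))).or f) := by
  induction ts generalizing a p f with
  | nil => simp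
  | cons t ts ih =>
      rw [List.foldl_cons, step_eq, ih,
        or_reverse_cons t ts _ a, or_reverse_cons t ts _ p, or_reverse_cons t ts _ f]
      simp

-- ===== VERDICT (by name: the statement is the Claim_ definition above) =====
theorem keyword_matching_spec : Claim_equal_keyword_matching := by
  intro u _
  unfold Spec_keyword_matching keyword_matching keyword_matching_alt
  rw [kmInit_eq, fold_eq]
  simp [D3]
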